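-- pv_equiv track=rewrite | github.com/faytonn/python | chessboard.py | count_tile_positions
-- ===== SOURCE A (Python) =====
-- def count_tile_positions(N, M, board):
--     h_count = 0
--     v_count = 0
--
--     for row in board:
--         count = 0
--         for cell in row:
--             if cell == 0:
--                 count += 1
--             else:
--                 if count >= N:
--                     h_count += (count - N + 1)
--                 count = 0
--         if count >= N:
--             h_count += (count - N + 1)
--
--     for col in range(M):
--         count = 0
--         for row in range(M):
--             if board[row][col] == 0:
--                 count += 1
--             else:
--                 if count >= N:
--                     v_count += (count - N + 1)
--                 count = 0
--         if count >= N: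
--             v_count += (count - N + 1)
--
--     return h_count + v_count
-- ===== SOURCE B (Python) =====
-- def count_tile_positions(N, M, board):
--     # Each line is split by its blockers (nonzero cells, plus sentinels at -1
--     # and len(line)) into gaps; a gap between blockers a < b admits
--     # max(0, b - a - N) placements.  Sum this over all rows and all columns.
--     def placements(line):
--         blockers = [-1] + [i for i, c in enumerate(line) if c != 0] + [len(line)]
--         return sum(max(0, b - a - N) for a, b in zip(blockers, blockers[1:]))
--
--     cols = [[board[r][c] for r in range(M)] for c in range(M)]
--     return sum(placements(row) for row in board) + sum(placements(col) for col in cols)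
-- ===== Notes on version B (the rewrite author's own statement) =====
-- stated objective: simpler
-- what changed: Replaces A's running zero-counter with duplicated post-loop flush by splitting each line at its blockers (sentinels at -1 and len) and summing max(0, gap - N) over consecutive blocker pairs; columns are materialized once as lists instead of re-indexed per cell.
import Mathlib
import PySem

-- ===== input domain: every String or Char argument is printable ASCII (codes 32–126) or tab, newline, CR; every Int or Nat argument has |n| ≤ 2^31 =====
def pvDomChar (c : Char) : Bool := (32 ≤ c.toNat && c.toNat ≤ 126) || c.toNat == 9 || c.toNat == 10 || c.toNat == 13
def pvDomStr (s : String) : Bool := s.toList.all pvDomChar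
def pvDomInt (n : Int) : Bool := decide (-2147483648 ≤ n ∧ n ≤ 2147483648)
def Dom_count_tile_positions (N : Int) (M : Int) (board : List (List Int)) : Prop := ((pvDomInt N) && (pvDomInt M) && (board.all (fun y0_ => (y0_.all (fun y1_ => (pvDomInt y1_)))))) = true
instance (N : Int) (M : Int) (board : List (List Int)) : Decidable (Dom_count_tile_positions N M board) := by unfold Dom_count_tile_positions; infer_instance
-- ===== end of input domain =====

-- B replaces A's running zero-counter with a blocker-gap decomposition (sentinels + gap formula); objective: simpler. Same return value on Pre_.

-- ===== PORT A =====
-- one loop step of A's inner scan: state = (accumulated count, current zero-run length)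
def stepA (N : Int) (s : Int × Int) (cell : Int) : Int × Int :=
  if cell = 0 then (s.1, s.2 + 1)
  else if s.2 ≥ N then (s.1 + (s.2 - N + 1), 0) else (s.1, 0)

-- A's post-loop flush of the trailing run
def flushA (N : Int) (s : Int × Int) : Int :=
  if s.2 ≥ N then s.1 + (s.2 - N + 1) else s.1

def count_tile_positions (N : Int) (M : Int) (board : List (List Int)) : Int :=
  -- board[row][col] ported with pyGetD; exact under Pre_ (all accesses in range)
  let h_count := board.foldl (fun h row => flushA N (row.foldl (stepA N) (h, 0))) 0
  let v_count := (PySem.List.pyRange 0 M 1).foldl (fun v col =>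
      flushA N ((PySem.List.pyRange 0 M 1).foldl
        (fun s r => stepA N s (PySem.List.pyGetD (PySem.List.pyGetD board r []) col 0)) (v, 0))) 0
  h_count + v_count

-- ===== PORT B =====
def placementsB (N : Int) (line : List Int) : Int :=
  let blockers : List Int :=
    [-1] ++ ((PySem.List.enumerate line).filter (fun p => p.2 != 0)).map (fun p => p.1)
         ++ [(line.length : Int)]
  ((blockers.zip blockers.tail).map (fun p => max 0 (p.2 - p.1 - N))).sum

def count_tile_positions_alt (N : Int) (M : Int) (board : List (List Int)) : Int :=
  -- board[r][c] ported with pyGetD; exact under Pre_ (all accesses in range)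
  let cols := (PySem.List.pyRange 0 M 1).map (fun c =>
      (PySem.List.pyRange 0 M 1).map (fun r => PySem.List.pyGetD (PySem.List.pyGetD board r []) c 0))
  (board.map (placementsB N)).sum + (cols.map (placementsB N)).sum

-- ===== PRECONDITION & SPEC =====
-- Pre_ excludes exactly the inputs where A raises IndexError: the column pass reads
-- board[row][col] for row, col in range(M), so it needs M ≤ len(board) and every one of
-- the first M rows to have length ≥ M (vacuous when M ≤ 0).
def Pre_count_tile_positions (N : Int) (M : Int) (board : List (List Int)) : Prop :=
  M ≤ 0 ∨ (M ≤ (board.length : Int) ∧ ∀ row ∈ board.take M.toNat, M ≤ (row.length : Int))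
instance (N : Int) (M : Int) (board : List (List Int)) : Decidable (Pre_count_tile_positions N M board) := by unfold Pre_count_tile_positions; infer_instance
def pvWitness_count_tile_positions : Int × Int × List (List Int) := (2, 2, [[0, 0], [0, 1]])

def Spec_count_tile_positions (N : Int) (M : Int) (board : List (List Int)) (out : Int) : Prop := out = count_tile_positions_alt N M board
instance (N : Int) (M : Int) (board : List (List Int)) (out : Int) : Decidable (Spec_count_tile_positions N M board out) := by unfold Spec_count_tile_positions; infer_instance

-- ===== CLAIM (what is proved, stated in full; the proofs are below) =====
def Claim_equal_count_tile_positions : Prop := ∀ (N : Int) (M : Int) (board : List (List Int)), Dom_count_tile_positions N M board → Pre_count_tile_positions N M board → Spec_count_tile_positions N M board (count_tile_positions N M board)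

-- ===== LEMMAS AND PROOFS =====

-- common reference function: value contributed by one line when the current zero-run has length c
def segCount (N : Int) (c : Int) : List Int → Int
  | [] => max 0 (c - N + 1)
  | x :: t => if x = 0 then segCount N (c + 1) t else max 0 (c - N + 1) + segCount N 0 t

lemma flushA_foldl (N : Int) (line : List Int) :
    ∀ h c : Int, flushA N (line.foldl (stepA N) (h, c)) = h + segCount N c line := by
  induction line with
  | nil =>
    intro h c
    simp only [List.foldl_nil, flushA, segCount]
    split_ifs <;> omega
  | cons x t ih =>
    intro h c
    simp only [List.foldl_cons, stepA, segCount]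
    by_cases hx : x = 0
    · simp [hx, ih]
    · by_cases hc : c ≥ N
      · simp only [if_neg hx, if_pos hc, ih]
        have : max 0 (c - N + 1) = c - N + 1 := by omega
        omega
      · simp only [if_neg hx, if_neg hc, ih]
        have : max 0 (c - N + 1) = 0 := by omega
        omega

-- A's outer accumulation over a list of lines is the sum of per-line segCounts
lemma foldl_flushA {α : Type} (N : Int) (g : α → List Int) (L : List α) :
    ∀ h0 : Int, L.foldl (fun h a => flushA N ((g a).foldl (stepA N) (h, 0))) h0
      = h0 + (L.map (fun a => segCount N 0 (g a))).sum := by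
  induction L with
  | nil => intro h0; simp
  | cons a L ih =>
    intro h0
    rw [List.foldl_cons, ih, flushA_foldl]
    simp only [List.map_cons, List.sum_cons]
    ring

-- gap-sum of the port B blocker list, in recursive form
lemma ps_cons (N a b : Int) (l : List Int) :
    (((a :: b :: l).zip (a :: b :: l).tail).map (fun p => max 0 (p.2 - p.1 - N))).sum
      = max 0 (b - a - N) + (((b :: l).zip (b :: l).tail).map (fun p => max 0 (p.2 - p.1 - N))).sum := by
  simp [List.zip]

lemma gap_segCount (N : Int) (line : List Int) :
    ∀ k p : Int,
      (((p :: (((PySem.List.enumerate line k).filter (fun q => q.2 != 0)).map (fun q => q.1)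
          ++ [k + (line.length : Int)])).zip
        (p :: (((PySem.List.enumerate line k).filter (fun q => q.2 != 0)).map (fun q => q.1)
          ++ [k + (line.length : Int)])).tail).map (fun p => max 0 (p.2 - p.1 - N))).sum
      = segCount N (k - 1 - p) line := by
  induction line with
  | nil =>
    intro k p
    simp only [PySem.List.enumerate_nil, List.filter_nil, List.map_nil, List.nil_append,
      List.length_nil, Int.natCast_zero, add_zero, segCount, List.zip, List.zipWith,
      List.tail_cons, List.map_cons, List.map_nil, List.sum_cons, List.sum_nil]
    have : k - 1 - p - N + 1 = k - p - N := by ring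
    rw [this]
  | cons x t ih =>
    intro k p
    rw [PySem.List.enumerate_cons]
    by_cases hx : x = 0
    · have hf : ((k, x) :: PySem.List.enumerate t (k + 1)).filter (fun q => q.2 != 0)
          = (PySem.List.enumerate t (k + 1)).filter (fun q => q.2 != 0) := by
        simp [hx]
      rw [hf]
      have hlen : k + ((x :: t).length : Int) = (k + 1) + (t.length : Int) := by
        simp [List.length_cons]; ring
      rw [hlen, ih (k + 1) p]
      simp only [segCount, if_pos hx]
      congr 1; ring
    · have hf : ((k, x) :: PySem.List.enumerate t (k + 1)).filter (fun q => q.2 != 0)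
          = (k, x) :: (PySem.List.enumerate t (k + 1)).filter (fun q => q.2 != 0) := by
        simp [hx]
      rw [hf]
      have hlen : k + ((x :: t).length : Int) = (k + 1) + (t.length : Int) := by
        simp [List.length_cons]; ring
      simp only [List.map_cons, List.cons_append, hlen]
      rw [ps_cons, ih (k + 1) k]
      simp only [segCount, if_neg hx]
      have : k + 1 - 1 - k = 0 := by ring
      rw [this]
      congr 2; ring

lemma placementsB_eq (N : Int) (line : List Int) :
    placementsB N line = segCount N 0 line := by
  have h := gap_segCount N line 0 (-1)
  simp only [zero_add, zero_sub] at h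
  simpa [placementsB] using h

-- ===== VERDICT (by name: the statement is the Claim_ definition above) =====
theorem count_tile_positions_spec : Claim_equal_count_tile_positions := by
  intro N M board _ _
  show count_tile_positions N M board = count_tile_positions_alt N M board
  simp only [count_tile_positions, count_tile_positions_alt]
  have hrows := foldl_flushA N (fun row : List Int => row) board 0
  have hcols := foldl_flushA N
      (fun col : Int => (PySem.List.pyRange 0 M 1).map
        (fun r => PySem.List.pyGetD (PySem.List.pyGetD board r []) col 0))
      (PySem.List.pyRange 0 M 1) 0
  simp only [List.foldl_map] at hcols
  rw [hrows, hcols]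
  have hb : List.map (placementsB N) board = board.map (fun a => segCount N 0 a) :=
    List.map_congr_left (fun a _ => placementsB_eq N a)
  rw [hb]
  simp [List.map_map, Function.comp_def, placementsB_eq]
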